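-- pv_equiv track=rewrite | github.com/etozheyia/First-try-project | Definitions/Task 4.py | eject_vowels
-- ===== SOURCE A (Python) =====
-- def eject_vowels(s):
--     s_split = s.split()
--     letters = []
--     small_vowels = ['a', 'e', 'i', 'o', 'u', 'y']
--     capital_vowels = ['A', 'E', 'I', 'O', 'U', 'Y']
--     shortest_word = min(s_split)
--
--     for o in range(len(shortest_word)):
--         for c in range(len(capital_vowels)):
--             if shortest_word[o] == capital_vowels[c]:
--                 letters.append(capital_vowels[c])
--                 capital_vowels[c] = ''
--
--     for o in range(len(shortest_word)):
--         for sm in range(len(small_vowels)):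
--             if shortest_word[o] == small_vowels[sm]:
--                 letters.append(small_vowels[sm])
--                 small_vowels[sm] = ''
--     return letters
-- ===== SOURCE B (Python) =====
-- def eject_vowels(s):
--     shortest = min(s.split())
--     upper = []
--     lower = []
--     for ch in shortest:
--         if ch in ["A", "E", "I", "O", "U", "Y"]:
--             if ch not in upper:
--                 upper.append(ch)
--         elif ch in ["a", "e", "i", "o", "u", "y"]:
--             if ch not in lower:
--                 lower.append(ch)
--     return upper + lower
-- ===== Notes on version B (the rewrite author's own statement) =====
-- stated objective: simpler
-- what changed: A makes two separate index-loop passes over the shortest word, each with an inner scan over a 6-slot vowel list that it mutates (blanking matched slots) to suppress duplicates; B makes one pass, partitioning characters into two order-preserving duplicate-free lists (uppercase vowels, then lowercase vowels) with direct membership tests, and returns their concatenation.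
import Mathlib
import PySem

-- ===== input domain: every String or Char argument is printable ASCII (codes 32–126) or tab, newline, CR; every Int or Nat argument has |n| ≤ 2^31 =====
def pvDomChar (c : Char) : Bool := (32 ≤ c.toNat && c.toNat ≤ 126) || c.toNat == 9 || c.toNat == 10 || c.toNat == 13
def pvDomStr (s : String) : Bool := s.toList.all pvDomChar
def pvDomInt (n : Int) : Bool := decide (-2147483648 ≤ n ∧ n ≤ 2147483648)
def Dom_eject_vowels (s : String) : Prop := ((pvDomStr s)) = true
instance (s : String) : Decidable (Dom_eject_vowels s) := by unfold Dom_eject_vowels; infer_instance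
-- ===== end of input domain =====

-- B replaces A's two passes over the shortest word (each with an inner scan over a vowel list that
-- A mutates by blanking matched slots) with one partitioning pass into two duplicate-free lists;
-- objective: simpler. Both raise ValueError on all-whitespace input (min([])); Pre_ excludes it.

-- ===== PORT A =====
def capsV : List String := ["A", "E", "I", "O", "U", "Y"]
def smallV : List String := ["a", "e", "i", "o", "u", "y"]

-- A's inner loop "for c in range(len(vows)): if shortest_word[o] == vows[c]:
--   letters.append(vows[c]); vows[c] = ''" on the state (letters, vows);
-- x is the one-character string shortest_word[o]
def innerFold (x : String) (st : List String × List String) : List String × List String :=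
  (PySem.List.pyRange 0 (st.2.length : Int) 1).foldl
    (fun st c =>
      if x == PySem.List.pyGetD st.2 c "" then
        (st.1 ++ [PySem.List.pyGetD st.2 c ""], st.2.set c.toNat "")
      else st)
    st

-- shortest_word[o] for o from range(len(shortest_word)) is always in range, so the pyGetD default
-- is never used; Python's s[o] is the one-character string String.ofList [s.toList[o]].
def eject_vowels (s : String) : List String :=
  match PySem.List.min? (PySem.Str.split₀ s) (fun x => x) with
  | none => []  -- unreachable under Pre_eject_vowels (Python: min([]) raises ValueError)
  | some shortest_word =>
    let st1 :=
      (PySem.List.pyRange 0 (PySem.Str.len shortest_word) 1).foldl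
        (fun st o => innerFold (String.ofList [PySem.List.pyGetD shortest_word.toList o ' ']) st)
        ([], capsV)
    let st2 :=
      (PySem.List.pyRange 0 (PySem.Str.len shortest_word) 1).foldl
        (fun st o => innerFold (String.ofList [PySem.List.pyGetD shortest_word.toList o ' ']) st)
        (st1.1, smallV)
    st2.1

-- ===== PORT B =====
-- one pass over shortest: partition each character into upper/lower first-occurrence lists
def eject_vowels_alt (s : String) : List String :=
  match PySem.List.min? (PySem.Str.split₀ s) (fun x => x) with
  | none => []  -- unreachable under Pre_eject_vowels (min([]) raises ValueError)
  | some shortest =>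
    let st := shortest.toList.foldl
      (fun (st : List String × List String) ch =>
        if String.ofList [ch] ∈ capsV then
          if String.ofList [ch] ∈ st.1 then st else (st.1 ++ [String.ofList [ch]], st.2)
        else if String.ofList [ch] ∈ smallV then
          if String.ofList [ch] ∈ st.2 then st else (st.1, st.2 ++ [String.ofList [ch]])
        else st)
      ([], [])
    st.1 ++ st.2

-- ===== PRECONDITION & SPEC =====
-- Python A raises ValueError (min of an empty sequence) when s.split() is empty, i.e. when s is
-- empty or all whitespace; B raises there too, so Pre_ excludes exactly those inputs.
def Pre_eject_vowels (s : String) : Prop := PySem.Str.split₀ s ≠ []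
instance (s : String) : Decidable (Pre_eject_vowels s) := by unfold Pre_eject_vowels; infer_instance
def pvWitness_eject_vowels : String := "Ayy bee"

def Spec_eject_vowels (s : String) (out : List String) : Prop := out = eject_vowels_alt s
instance (s : String) (out : List String) : Decidable (Spec_eject_vowels s out) := by unfold Spec_eject_vowels; infer_instance

-- ===== CLAIM (what is proved, stated in full; the proofs are below) =====
def Claim_equal_eject_vowels : Prop := ∀ (s : String), Dom_eject_vowels s → Pre_eject_vowels s → Spec_eject_vowels s (eject_vowels s)

-- ===== LEMMAS AND PROOFS =====

-- the common abstraction: after processing a prefix, A's vowel list is the original one with the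
-- already-collected entries blanked (maskv), and both programs extend the accumulator by stepv
def maskv (acc : List String) (v : String) : String := if v ∈ acc then "" else v
def stepv (V acc : List String) (x : String) : List String :=
  if x ∈ V ∧ x ∉ acc then acc ++ [x] else acc

def innerAux (x : String) (acc : List String) : List String → List String × List String
  | [] => (acc, [])
  | v :: vs =>
      if x == v then
        ((innerAux x (acc ++ [v]) vs).1, "" :: (innerAux x (acc ++ [v]) vs).2)
      else
        ((innerAux x acc vs).1, v :: (innerAux x acc vs).2)

lemma getD_append_len (pre : List String) (v : String) (vs : List String) :
    PySem.List.pyGetD (pre ++ v :: vs) (pre.length : Int) "" = v := by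
  simp [PySem.List.pyGetD]

lemma set_append_len (pre : List String) (a : String) (v : String) (vs : List String) :
    (pre ++ v :: vs).set pre.length a = pre ++ a :: vs := by
  induction pre with
  | nil => rfl
  | cons p ps ih => simp [ih]

lemma innerG (x : String) : ∀ (vows pre acc : List String),
    (PySem.List.pyRange (pre.length : Int) ((pre.length : Int) + (vows.length : Int)) 1).foldl
      (fun st c =>
        if x == PySem.List.pyGetD st.2 c "" then
          (st.1 ++ [PySem.List.pyGetD st.2 c ""], st.2.set c.toNat "")
        else st)
      (acc, pre ++ vows)
    = ((innerAux x acc vows).1, pre ++ (innerAux x acc vows).2) := by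
  intro vows
  induction vows with
  | nil => intro pre acc; simp [PySem.List.pyRange_one_eq_nil, innerAux]
  | cons v vs ih =>
    intro pre acc
    have hlt : (pre.length : Int) < (pre.length : Int) + ((v :: vs).length : Int) := by
      simp only [List.length_cons]; omega
    rw [PySem.List.pyRange_one_cons hlt, List.foldl_cons]
    rw [getD_append_len]
    by_cases hxv : x = v
    · subst hxv
      simp only [BEq.rfl, if_true, Int.toNat_natCast, set_append_len]
      have heq : pre ++ "" :: vs = (pre ++ [""]) ++ vs := by simp
      have hr : (pre.length : Int) + 1 = (((pre ++ [""]).length : Int)) := by simp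
      have hb : (pre.length : Int) + ((x :: vs).length : Int) =
          (((pre ++ [""]).length : Int) + (vs.length : Int)) := by
        simp [List.length_append, List.length_cons]; omega
      rw [heq, hr, hb, ih (pre ++ [""]) (acc ++ [x])]
      simp [innerAux]
    · have hc : (x == v) = false := beq_eq_false_iff_ne.mpr hxv
      simp only [hc, Bool.false_eq_true, if_false]
      have heq : pre ++ v :: vs = (pre ++ [v]) ++ vs := by simp
      have hr : (pre.length : Int) + 1 = (((pre ++ [v]).length : Int)) := by simp
      have hb : (pre.length : Int) + ((v :: vs).length : Int) =
          (((pre ++ [v]).length : Int) + (vs.length : Int)) := by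
        simp [List.length_append, List.length_cons]; omega
      rw [heq, hr, hb, ih (pre ++ [v]) acc]
      simp [innerAux, hc]

lemma innerFold_eq (x : String) (acc vows : List String) :
    innerFold x (acc, vows) = innerAux x acc vows := by
  have h := innerG x vows [] acc
  simp only [List.length_nil, Nat.cast_zero, zero_add, List.nil_append] at h
  unfold innerFold
  simpa using h

lemma innerAux_nomatch (x : String) (acc : List String) :
    ∀ (l : List String), (∀ v ∈ l, x ≠ v) → innerAux x acc l = (acc, l) := by
  intro l
  induction l with
  | nil => intro _; rfl
  | cons v vs ih =>
    intro h
    have hc : (x == v) = false := beq_eq_false_iff_ne.mpr (h v (by simp))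
    simp [innerAux, hc, ih (fun u hu => h u (by simp [hu]))]

lemma innerAux_mask : ∀ (V : List String), V.Nodup → "" ∉ V → ∀ (x : String), x ≠ "" → ∀ (acc : List String),
    innerAux x acc (V.map (maskv acc)) = (stepv V acc x, V.map (maskv (stepv V acc x))) := by
  intro V
  induction V with
  | nil => intro _ _ x _ acc; simp [innerAux, stepv]
  | cons v vs ih =>
    intro hnd hne x hx acc
    have hnv : v ∉ vs := (List.nodup_cons.mp hnd).1
    have hndt : vs.Nodup := (List.nodup_cons.mp hnd).2
    have hnet : "" ∉ vs := fun h => hne (List.mem_cons_of_mem _ h)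
    by_cases hxv : x = v
    · subst hxv
      have hnomatch : ∀ w ∈ vs.map (maskv acc), x ≠ w := by
        intro w hw
        rcases List.mem_map.mp hw with ⟨u, hu, rfl⟩
        by_cases humem : u ∈ acc
        · simpa [maskv, humem] using hx
        · simp only [maskv, humem, if_false]
          exact fun h => hnv (h ▸ hu)
      by_cases hmem : x ∈ acc
      · have h0 : maskv acc x = "" := by simp [maskv, hmem]
        have hc : (x == "") = false := beq_eq_false_iff_ne.mpr hx
        simp only [List.map_cons, h0, innerAux, hc, Bool.false_eq_true, if_false,
          innerAux_nomatch x acc _ hnomatch]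
        have hst : stepv (x :: vs) acc x = acc := by simp [stepv, hmem]
        rw [hst]
        simp [maskv, hmem]
      · have h0 : maskv acc x = x := by simp [maskv, hmem]
        simp only [List.map_cons, h0, innerAux, BEq.rfl, if_true,
          innerAux_nomatch x (acc ++ [x]) _ hnomatch]
        have hst : stepv (x :: vs) acc x = acc ++ [x] := by simp [stepv, hmem]
        rw [hst]
        have htail : vs.map (maskv (acc ++ [x])) = vs.map (maskv acc) :=
          List.map_congr_left (fun u hu => by
            have hux : u ≠ x := fun h => hnv (h ▸ hu)
            simp [maskv, List.mem_append, hux])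
        have hhead : maskv (acc ++ [x]) x = "" := by simp [maskv]
        rw [hhead, htail]
    · have hc : (x == maskv acc v) = false := by
        unfold maskv; split
        · exact beq_eq_false_iff_ne.mpr hx
        · exact beq_eq_false_iff_ne.mpr hxv
      simp only [List.map_cons, innerAux, hc, Bool.false_eq_true, if_false,
        ih hndt hnet x hx acc]
      have hst : stepv (v :: vs) acc x = stepv vs acc x := by
        simp [stepv, List.mem_cons, hxv]
      rw [hst]
      have hhead : maskv (stepv vs acc x) v = maskv acc v := by
        unfold stepv; split
        · have hvx : ¬ v = x := fun h => hxv h.symm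
          by_cases hva : v ∈ acc <;> simp [maskv, List.mem_append, hva, hvx]
        · rfl
      rw [hhead]

lemma innerFold_caps (c : Char) (acc : List String) :
    innerFold (String.ofList [c]) (acc, capsV.map (maskv acc)) =
      (stepv capsV acc (String.ofList [c]),
       capsV.map (maskv (stepv capsV acc (String.ofList [c])))) := by
  rw [innerFold_eq,
    innerAux_mask capsV (by decide) (by decide) (String.ofList [c]) (by simp) acc]

lemma innerFold_small (c : Char) (acc : List String) :
    innerFold (String.ofList [c]) (acc, smallV.map (maskv acc)) =
      (stepv smallV acc (String.ofList [c]),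
       smallV.map (maskv (stepv smallV acc (String.ofList [c])))) := by
  rw [innerFold_eq,
    innerAux_mask smallV (by decide) (by decide) (String.ofList [c]) (by simp) acc]

lemma pass_fold (V : List String)
    (hstep : ∀ (c : Char) (a : List String),
      innerFold (String.ofList [c]) (a, V.map (maskv a)) =
        (stepv V a (String.ofList [c]), V.map (maskv (stepv V a (String.ofList [c])))))
    (L : List Char) (acc : List String) :
    L.foldl (fun st ch => innerFold (String.ofList [ch]) st) (acc, V.map (maskv acc)) =
      (L.foldl (fun a ch => stepv V a (String.ofList [ch])) acc,
       V.map (maskv (L.foldl (fun a ch => stepv V a (String.ofList [ch])) acc))) := by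
  induction L generalizing acc with
  | nil => rfl
  | cons ch L ih => rw [List.foldl_cons, hstep, List.foldl_cons]; exact ih _

lemma stepv_fold_subset (V : List String) (L : List Char) (acc : List String) :
    ∀ x ∈ L.foldl (fun a ch => stepv V a (String.ofList [ch])) acc, x ∈ acc ∨ x ∈ V := by
  induction L generalizing acc with
  | nil => intro x hx; exact Or.inl hx
  | cons ch L ih =>
    intro x hx
    rw [List.foldl_cons] at hx
    rcases ih _ x hx with h | h
    · have h' : x ∈ stepv V acc (String.ofList [ch]) := h
      unfold stepv at h'
      split at h'
      · rcases List.mem_append.mp h' with h'' | h''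
        · exact Or.inl h''
        · rename_i hc
          exact Or.inr (by rw [List.mem_singleton.mp h'']; exact hc.1)
      · exact Or.inl h'
    · exact Or.inr h

lemma stepv_fold_prefix (V : List String) (L : List Char) (p q : List String)
    (hp : ∀ x ∈ V, x ∉ p) :
    L.foldl (fun a ch => stepv V a (String.ofList [ch])) (p ++ q) =
      p ++ L.foldl (fun a ch => stepv V a (String.ofList [ch])) q := by
  induction L generalizing q with
  | nil => rfl
  | cons ch L ih =>
    rw [List.foldl_cons, List.foldl_cons]
    have hst : stepv V (p ++ q) (String.ofList [ch]) = p ++ stepv V q (String.ofList [ch]) := by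
      unfold stepv
      by_cases hv : String.ofList [ch] ∈ V
      · have hnp : String.ofList [ch] ∉ p := hp _ hv
        by_cases hq : String.ofList [ch] ∈ q
        · simp [hv, hq, List.mem_append, hnp]
        · simp [hv, hq, List.mem_append, hnp]
      · simp [hv]
    rw [hst]; exact ih _

lemma small_not_caps : ∀ x ∈ smallV, x ∉ capsV := by decide

lemma mask_nil (V : List String) : V.map (maskv []) = V := by
  have h : ∀ v ∈ V, maskv [] v = v := fun v _ => by simp [maskv]
  calc V.map (maskv []) = V.map id := List.map_congr_left h
    _ = V := List.map_id _

lemma mask_small_of_caps_sub (acc : List String) (hsub : ∀ x ∈ acc, x ∈ capsV) :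
    smallV.map (maskv acc) = smallV := by
  have h : ∀ v ∈ smallV, maskv acc v = v := by
    intro v hv
    unfold maskv
    have hnv : v ∉ acc := fun hmem => (small_not_caps v hv) (hsub v hmem)
    simp [hnv]
  calc smallV.map (maskv acc) = smallV.map id := List.map_congr_left h
    _ = smallV := List.map_id _

lemma passA_eq (w : String) (init : List String × List String) :
    (PySem.List.pyRange 0 (PySem.Str.len w) 1).foldl
        (fun st o => innerFold (String.ofList [PySem.List.pyGetD w.toList o ' ']) st) init =
      w.toList.foldl (fun st ch => innerFold (String.ofList [ch]) st) init := by
  rw [PySem.Str.len_eq]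
  exact PySem.List.foldl_pyRange_zero_pyGetD' w.toList ' '
    (fun st ch => innerFold (String.ofList [ch]) st) init

lemma bbody_eq :
    (fun (st : List String × List String) ch =>
        if String.ofList [ch] ∈ capsV then
          if String.ofList [ch] ∈ st.1 then st else (st.1 ++ [String.ofList [ch]], st.2)
        else if String.ofList [ch] ∈ smallV then
          if String.ofList [ch] ∈ st.2 then st else (st.1, st.2 ++ [String.ofList [ch]])
        else st) =
      (fun st ch => (stepv capsV st.1 (String.ofList [ch]), stepv smallV st.2 (String.ofList [ch]))) := by
  funext st ch
  obtain ⟨u, l⟩ := st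
  unfold stepv
  by_cases hc : String.ofList [ch] ∈ capsV
  · have hs : String.ofList [ch] ∉ smallV := fun hmem => (small_not_caps _ hmem) hc
    by_cases hu : String.ofList [ch] ∈ u <;> simp [hc, hs, hu]
  · by_cases hs : String.ofList [ch] ∈ smallV
    · by_cases hl : String.ofList [ch] ∈ l <;> simp [hc, hs, hl]
    · simp [hc, hs]

lemma agree_some (w : String) :
    (let st1 :=
      (PySem.List.pyRange 0 (PySem.Str.len w) 1).foldl
        (fun st o => innerFold (String.ofList [PySem.List.pyGetD w.toList o ' ']) st) ([], capsV)
     let st2 :=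
      (PySem.List.pyRange 0 (PySem.Str.len w) 1).foldl
        (fun st o => innerFold (String.ofList [PySem.List.pyGetD w.toList o ' ']) st) (st1.1, smallV)
     st2.1) =
    (let st := w.toList.foldl
      (fun (st : List String × List String) ch =>
        if String.ofList [ch] ∈ capsV then
          if String.ofList [ch] ∈ st.1 then st else (st.1 ++ [String.ofList [ch]], st.2)
        else if String.ofList [ch] ∈ smallV then
          if String.ofList [ch] ∈ st.2 then st else (st.1, st.2 ++ [String.ofList [ch]])
        else st) ([], [])
     st.1 ++ st.2) := by
  simp only [passA_eq, bbody_eq]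
  set L := w.toList with hL
  have h1 : L.foldl (fun st ch => innerFold (String.ofList [ch]) st) ([], capsV) =
      (L.foldl (fun a ch => stepv capsV a (String.ofList [ch])) [],
       capsV.map (maskv (L.foldl (fun a ch => stepv capsV a (String.ofList [ch])) []))) := by
    conv_lhs => rw [← mask_nil capsV]
    exact pass_fold capsV innerFold_caps L []
  set C := L.foldl (fun a ch => stepv capsV a (String.ofList [ch])) [] with hC
  have hCsub : ∀ x ∈ C, x ∈ capsV := by
    intro x hx
    rcases stepv_fold_subset capsV L [] x hx with h | h
    · cases h
    · exact h
  have h2 : L.foldl (fun st ch => innerFold (String.ofList [ch]) st) (C, smallV) =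
      (L.foldl (fun a ch => stepv smallV a (String.ofList [ch])) C,
       smallV.map (maskv (L.foldl (fun a ch => stepv smallV a (String.ofList [ch])) C))) := by
    conv_lhs => rw [← mask_small_of_caps_sub C hCsub]
    exact pass_fold smallV innerFold_small L C
  have h3 : L.foldl (fun a ch => stepv smallV a (String.ofList [ch])) C =
      C ++ L.foldl (fun a ch => stepv smallV a (String.ofList [ch])) [] := by
    have h := stepv_fold_prefix smallV L C []
      (fun x hx hmem => (small_not_caps x hx) (hCsub x hmem))
    simpa using h
  simp only [h1, h2, h3]
  rw [PySem.List.foldl_prod_mk (fun a ch => stepv capsV a (String.ofList [ch]))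
    (fun a ch => stepv smallV a (String.ofList [ch]))]

-- ===== VERDICT (by name: the statement is the Claim_ definition above) =====
theorem eject_vowels_spec : Claim_equal_eject_vowels := by
  intro s _ _
  unfold Spec_eject_vowels eject_vowels eject_vowels_alt
  rcases hmin : PySem.List.min? (PySem.Str.split₀ s) (fun x => x) with _ | w
  · rfl
  · exact agree_some w
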